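-- pv_equiv track=rewrite | github.com/arjunmullick/plant-backend-image-classifier | app/ml/species_models/consensus_engine.py | _get_consensus_common_name
-- ===== SOURCE A (Python) =====
-- from collections import defaultdict
-- from typing import List, Dict, Optional, Any, Tuple
--
-- def _get_consensus_common_name(
--
--     normalized: List[Dict[str, Any]]
-- ) -> Optional[str]:
--     """Get most common common name across predictions."""
--     name_counts: Dict[str, int] = defaultdict(int)
--
--     for pred in normalized:
--         for name in pred.get("common_names", []):
--             name_counts[name.lower()] += 1
--
--     if not name_counts:
--         return None
--
--     # Get most common, preserving original case
--     most_common = max(name_counts.items(), key=lambda x: x[1])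
--     most_common_lower = most_common[0]
--
--     # Find original case version
--     for pred in normalized:
--         for name in pred.get("common_names", []):
--             if name.lower() == most_common_lower:
--                 return name
--
--     return most_common_lower.title()
-- ===== SOURCE B (Python) =====
-- def _get_consensus_common_name(normalized):
--     """Get most common common name across predictions, in one pass:
--     record the first-seen original-case spelling while counting."""
--     name_counts = {}
--     first_case = {}
--     for pred in normalized:
--         for name in pred.get("common_names", []):
--             key = name.lower()
--             name_counts[key] = name_counts.get(key, 0) + 1
--             first_case.setdefault(key, name)
--     if not name_counts:
--         return None
--     most_common_lower = max(name_counts.items(), key=lambda x: x[1])[0]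
--     return first_case[most_common_lower]
-- ===== Notes on version B (the rewrite author's own statement) =====
-- stated objective: simpler
-- what changed: B fuses A's two scans over normalized into a single counting pass that also records the first-seen original-case spelling per lowercased key (dict setdefault), then answers by one dict lookup instead of re-scanning all predictions; A's unreachable title() fallback disappears.
import Mathlib
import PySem

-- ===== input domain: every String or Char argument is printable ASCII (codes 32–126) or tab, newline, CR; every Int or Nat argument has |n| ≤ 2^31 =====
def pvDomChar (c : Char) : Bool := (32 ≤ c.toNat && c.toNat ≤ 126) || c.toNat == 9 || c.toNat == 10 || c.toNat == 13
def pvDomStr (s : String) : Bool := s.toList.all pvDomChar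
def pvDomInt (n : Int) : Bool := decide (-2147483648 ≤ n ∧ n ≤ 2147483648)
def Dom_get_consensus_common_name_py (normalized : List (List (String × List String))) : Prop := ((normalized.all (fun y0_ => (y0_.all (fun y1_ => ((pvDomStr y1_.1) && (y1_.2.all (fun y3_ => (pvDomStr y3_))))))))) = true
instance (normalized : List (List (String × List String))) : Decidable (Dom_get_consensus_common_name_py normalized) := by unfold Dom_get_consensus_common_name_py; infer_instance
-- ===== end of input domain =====

-- B fuses A's two scans into one pass: while counting lowercased names it records the
-- first-seen original-case spelling per key, so the second scan over `normalized` disappears (simpler).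


-- ===== PORT A =====
-- pred.get("common_names", [])
def pvCommon (pred : List (String × List String)) : List String :=
  PySem.Dict.getD (PySem.Dict.mk pred) "common_names" []

-- str.title(), hand-ported (exact on the printable-ASCII domain: a letter is uppercased
-- when the previous character is not a letter, lowercased otherwise); only reached on
-- A's fallback line, which the proof shows is unreachable.
def pvTitleChars : Bool → List Char → List Char
  | _, [] => []
  | prevAlpha, c :: cs =>
    (if c.isAlpha then (if prevAlpha then c.toLower else c.toUpper) else c)
      :: pvTitleChars c.isAlpha cs

-- the second 'for pred in normalized: for name in …: if name.lower() == target: return name'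
def pvScanA (target : String) : List (List (String × List String)) → Option String
  | [] => none
  | pred :: rest =>
    match (pvCommon pred).find? (fun name => PySem.Str.lower name == target) with
    | some name => some name
    | none => pvScanA target rest

def get_consensus_common_name_py (normalized : List (List (String × List String))) : Option String :=
  let nameCounts : PySem.Dict String Int :=
    normalized.foldl (fun d pred =>
      (pvCommon pred).foldl (fun d name => d.modify (PySem.Str.lower name) 0 (· + 1)) d)
      PySem.Dict.empty
  if nameCounts.items = [] then none
  else
    match PySem.List.max? nameCounts.items (fun x => x.2) with
    | none => none   -- unreachable: items ≠ []
    | some most_common =>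
      let most_common_lower := most_common.1
      match pvScanA most_common_lower normalized with
      | some name => some name
      | none => some (String.ofList (pvTitleChars false most_common_lower.toList))

-- ===== PORT B =====
def get_consensus_common_name_py_alt (normalized : List (List (String × List String))) : Option String :=
  let st : PySem.Dict String Int × PySem.Dict String String :=
    normalized.foldl (fun st pred =>
      (pvCommon pred).foldl (fun st name =>
        let key := PySem.Str.lower name
        (st.1.insert key (st.1.getD key 0 + 1), st.2.setdefault key name)) st)
      (PySem.Dict.empty, PySem.Dict.empty)
  if st.1.items = [] then none
  else
    match PySem.List.max? st.1.items (fun x => x.2) with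
    | none => none   -- unreachable: items ≠ []
    | some most_common => st.2.get? most_common.1

-- ===== PRECONDITION & SPEC =====
def Spec_get_consensus_common_name_py (normalized : List (List (String × List String))) (out : Option String) : Prop := out = get_consensus_common_name_py_alt normalized
instance (normalized : List (List (String × List String))) (out : Option String) : Decidable (Spec_get_consensus_common_name_py normalized out) := by unfold Spec_get_consensus_common_name_py; infer_instance

-- ===== CLAIM (what is proved, stated in full; the proofs are below) =====
def Claim_equal_get_consensus_common_name_py : Prop := ∀ (normalized : List (List (String × List String))), Dom_get_consensus_common_name_py normalized → Spec_get_consensus_common_name_py normalized (get_consensus_common_name_py normalized)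

-- ===== LEMMAS AND PROOFS =====

-- all names in scan order
def pvNames (normalized : List (List (String × List String))) : List String :=
  normalized.flatMap pvCommon

lemma pvCountsA_flat (normalized : List (List (String × List String)))
    (d : PySem.Dict String Int) :
    normalized.foldl (fun d pred =>
      (pvCommon pred).foldl (fun d name => d.modify (PySem.Str.lower name) 0 (· + 1)) d) d
    = (pvNames normalized).foldl (fun d name => d.modify (PySem.Str.lower name) 0 (· + 1)) d := by
  induction normalized generalizing d with
  | nil => rfl
  | cons p rest ih => simp [pvNames, List.flatMap_cons, List.foldl_append, ih]

lemma pvPairB_flat (normalized : List (List (String × List String)))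
    (st : PySem.Dict String Int × PySem.Dict String String) :
    normalized.foldl (fun st pred =>
      (pvCommon pred).foldl (fun st name =>
        let key := PySem.Str.lower name
        (st.1.insert key (st.1.getD key 0 + 1), st.2.setdefault key name)) st) st
    = ((pvNames normalized).foldl (fun d name => d.modify (PySem.Str.lower name) 0 (· + 1)) st.1,
       (pvNames normalized).foldl (fun fc name => fc.setdefault (PySem.Str.lower name) name) st.2) := by
  induction normalized generalizing st with
  | nil => rfl
  | cons p rest ih =>
      obtain ⟨a, b⟩ := st
      simp only [List.foldl_cons, ih, pvNames, List.flatMap_cons, List.foldl_append]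
      rw [PySem.List.foldl_prod_mk
        (f := fun (d : PySem.Dict String Int) name => d.insert (PySem.Str.lower name) (d.getD (PySem.Str.lower name) 0 + 1))
        (g := fun (fc : PySem.Dict String String) name => fc.setdefault (PySem.Str.lower name) name)]
      rfl

lemma pvScanA_flat (target : String) (normalized : List (List (String × List String))) :
    pvScanA target normalized
    = (pvNames normalized).find? (fun name => PySem.Str.lower name == target) := by
  induction normalized with
  | nil => rfl
  | cons p rest ih =>
      simp only [pvScanA, pvNames, List.flatMap_cons, List.find?_append, ih]
      cases (pvCommon p).find? (fun name => PySem.Str.lower name == target) <;> rfl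

lemma pvSetdefault_get? (ns : List String) (fc : PySem.Dict String String) (k : String) :
    (ns.foldl (fun fc name => fc.setdefault (PySem.Str.lower name) name) fc).get? k
    = (fc.get? k).or (ns.find? (fun name => PySem.Str.lower name == k)) := by
  induction ns generalizing fc with
  | nil => simp
  | cons n rest ih =>
      simp only [List.foldl_cons, List.find?_cons, ih]
      by_cases hc : fc.contains (PySem.Str.lower n) = true
      · rw [PySem.Dict.setdefault_of_contains fc n hc]
        by_cases hk : PySem.Str.lower n == k
        · simp only [hk]
          have : fc.get? k ≠ none := by
            rw [← (eq_of_beq hk)]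
            intro h
            rw [PySem.Dict.get?_eq_none_iff_contains] at h
            simp [hc] at h
          cases hfc : fc.get? k with
          | none => exact absurd hfc this
          | some v => rfl
        · simp [hk]
      · rw [PySem.Dict.setdefault_of_not_contains fc n (by simpa using hc)]
        rw [PySem.Dict.get?_insert]
        by_cases hk : k = PySem.Str.lower n
        · subst hk
          have hget : fc.get? (PySem.Str.lower n) = none := by
            rw [PySem.Dict.get?_eq_none_iff_contains]
            simpa using hc
          simp [hget]
        · have hbeq : (PySem.Str.lower n == k) = false := by
            simpa [beq_iff_eq] using fun h => hk h.symm
          simp [if_neg hk, hbeq]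

lemma pvKeys_counts (ns : List String) :
    (ns.foldl (fun d name => d.modify (PySem.Str.lower name) 0 (· + 1)) (PySem.Dict.empty : PySem.Dict String Int)).keys
    = PySem.Set.ofList (ns.map PySem.Str.lower) := by
  have h := PySem.Dict.keys_foldl_modify_key (l := ns) (key := PySem.Str.lower)
    (d0 := (0 : Int)) (f := fun _ _ => (fun v => v + 1)) (d := PySem.Dict.empty)
  simpa [PySem.Set.update, PySem.Set.ofList_eq_foldl] using h

-- ===== VERDICT (by name: the statement is the Claim_ definition above) =====
theorem get_consensus_common_name_py_spec : Claim_equal_get_consensus_common_name_py := by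
  intro normalized _
  unfold Spec_get_consensus_common_name_py
  unfold get_consensus_common_name_py get_consensus_common_name_py_alt
  rw [pvCountsA_flat, pvPairB_flat]
  dsimp only
  set counts : PySem.Dict String Int := (pvNames normalized).foldl
      (fun d name => d.modify (PySem.Str.lower name) 0 (· + 1)) PySem.Dict.empty with hcounts
  by_cases hempty : counts.items = []
  · simp [hempty]
  · simp only [if_neg hempty]
    cases hmax : PySem.List.max? counts.items (fun x => x.2) with
    | none =>
        exact absurd ((PySem.List.max?_eq_none_iff _ _).mp hmax) hempty
    | some mc =>
        simp only []
        -- mc.1 is a key of counts, hence the lowercase of some name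
        have hmem : mc ∈ counts.items := PySem.List.max?_mem hmax
        have hkey : mc.1 ∈ counts.keys := by
          unfold PySem.Dict.keys
          exact List.mem_map_of_mem hmem
        rw [pvKeys_counts] at hkey
        have hkey' : mc.1 ∈ (pvNames normalized).map PySem.Str.lower := by
          simpa [PySem.Set.mem_ofList] using hkey
        obtain ⟨n, hn, hln⟩ := List.mem_map.mp hkey'
        have hfind : ((pvNames normalized).find?
            (fun name => PySem.Str.lower name == mc.1)).isSome := by
          rcases hfe : (pvNames normalized).find? (fun name => PySem.Str.lower name == mc.1) with _ | v
          · have := List.find?_eq_none.mp hfe n hn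
            simp [hln] at this
          · rfl
        rw [pvScanA_flat, pvSetdefault_get?]
        cases hf : (pvNames normalized).find? (fun name => PySem.Str.lower name == mc.1) with
        | none => rw [hf] at hfind; simp at hfind
        | some v => simp [PySem.Dict.get?_empty]
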